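-- pv_equiv track=rewrite | github.com/PhilippB4/codewars | python/6 kyu/Coding Meetup #8 - Higher-Order Functions Series - Will all continents be represented.py | all_continents
-- ===== SOURCE A (Python) =====
-- def all_continents(lst):
--     # your code here
--     continents = ['Africa', 'Americas', 'Asia', 'Europe', 'Oceania']
--     for dict in lst:
--         if dict['continent'] in continents:
--             del continents[continents.index(dict['continent'])]
--     if continents:
--         return False
--     else:
--         return True
-- ===== SOURCE B (Python) =====
-- def all_continents(lst):
--     seen = {d['continent'] for d in lst}
--     return {'Africa', 'Americas', 'Asia', 'Europe', 'Oceania'} <= seen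
-- ===== Notes on version B (the rewrite author's own statement) =====
-- stated objective: idiomatic
-- what changed: B builds the set of continents seen in one comprehension and answers with a single subset test, instead of A's mutable shrinking list with per-element membership test, index lookup and deletion.
import Mathlib
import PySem

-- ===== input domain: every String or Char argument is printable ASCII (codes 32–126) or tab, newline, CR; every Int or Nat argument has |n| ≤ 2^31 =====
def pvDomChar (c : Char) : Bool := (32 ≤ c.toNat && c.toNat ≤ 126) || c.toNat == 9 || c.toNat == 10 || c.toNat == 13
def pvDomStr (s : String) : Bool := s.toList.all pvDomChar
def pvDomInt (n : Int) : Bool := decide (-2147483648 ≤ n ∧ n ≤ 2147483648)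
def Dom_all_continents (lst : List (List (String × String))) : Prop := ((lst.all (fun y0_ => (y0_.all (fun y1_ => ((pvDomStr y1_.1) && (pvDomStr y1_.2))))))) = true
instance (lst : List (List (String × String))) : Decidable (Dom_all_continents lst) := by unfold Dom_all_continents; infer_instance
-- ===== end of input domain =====

-- B replaces A's mutable shrinking list (membership test + index + delete per element) with a
-- one-pass set of seen continents and a single subset test (idiomatic; same return value).

-- shared helper: Python's d['continent'] (first-match association lookup; Pre_ guarantees the key is present)
def contOf (d : List (String × String)) : String :=
  ((PySem.Dict.mk d).get? "continent").getD ""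

-- ===== PORT A =====
def all_continents (lst : List (List (String × String))) : Bool :=
  let continents :=
    lst.foldl (fun cs d =>
      -- if dict['continent'] in continents: del continents[continents.index(dict['continent'])]
      if cs.contains (contOf d) then (PySem.List.remove? cs (contOf d)).getD cs else cs)
      ["Africa", "Americas", "Asia", "Europe", "Oceania"]
  if continents.isEmpty then true else false

-- ===== PORT B =====
def all_continents_alt (lst : List (List (String × String))) : Bool :=
  let seen : PySem.Set String := PySem.Set.ofList (lst.map contOf)
  PySem.Set.issubset (PySem.Set.ofList ["Africa", "Americas", "Asia", "Europe", "Oceania"]) seen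

-- ===== PRECONDITION & SPEC =====
-- Pre_ excludes exactly the inputs where some element has no "continent" key, on which Python A raises KeyError.
def Pre_all_continents (lst : List (List (String × String))) : Prop :=
  (lst.all (fun d => (PySem.Dict.mk d).contains "continent")) = true
instance (lst : List (List (String × String))) : Decidable (Pre_all_continents lst) := by unfold Pre_all_continents; infer_instance

def pvWitness_all_continents : (List (List (String × String))) :=
  [[("continent", "Africa")], [("continent", "Asia")]]

def Spec_all_continents (lst : List (List (String × String))) (out : Bool) : Prop := out = all_continents_alt lst
instance (lst : List (List (String × String))) (out : Bool) : Decidable (Spec_all_continents lst out) := by unfold Spec_all_continents; infer_instance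

-- ===== CLAIM (what is proved, stated in full; the proofs are below) =====
def Claim_equal_all_continents : Prop := ∀ (lst : List (List (String × String))), Dom_all_continents lst → Pre_all_continents lst → Spec_all_continents lst (all_continents lst)

-- ===== LEMMAS AND PROOFS =====

-- one step of A's loop on a duplicate-free list is a filter
lemma step_eq (cs : List String) (c : String) (h : cs.Nodup) :
    (if cs.contains c then (PySem.List.remove? cs c).getD cs else cs)
      = cs.filter (fun a => !(a == c)) := by
  by_cases hm : c ∈ cs
  · rw [if_pos (by simpa using hm), PySem.List.remove?_eq_some_erase cs c hm]
    simp [h.erase_eq_filter, bne]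
  · rw [if_neg (by simpa using hm)]
    exact (List.filter_eq_self.mpr (fun a ha => by simp; rintro rfl; exact hm ha)).symm

-- A's whole loop keeps exactly the continents not seen in lst
lemma foldl_filter (L : List (List (String × String))) : ∀ cs : List String, cs.Nodup →
    L.foldl (fun cs d =>
      if cs.contains (contOf d) then (PySem.List.remove? cs (contOf d)).getD cs else cs) cs
    = cs.filter (fun a => !((L.map contOf).contains a)) := by
  induction L with
  | nil => intro cs h; simp
  | cons d L ih =>
    intro cs h
    simp only [List.foldl_cons, step_eq cs (contOf d) h]
    rw [ih _ (h.filter _), List.filter_filter]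
    apply List.filter_congr
    intro a _
    by_cases hac : a = contOf d <;> simp [hac, Bool.and_comm]

-- ===== VERDICT (by name: the statement is the Claim_ definition above) =====
theorem all_continents_spec : Claim_equal_all_continents := by
  intro lst _ _
  unfold Spec_all_continents all_continents all_continents_alt
  rw [foldl_filter lst _ (by decide)]
  rw [Bool.eq_iff_iff]
  constructor
  · intro h
    have hnil : List.filter (fun a => !((lst.map contOf).contains a))
        ["Africa", "Americas", "Asia", "Europe", "Oceania"] = [] := by
      by_cases hc : (List.filter (fun a => !((lst.map contOf).contains a))
          ["Africa", "Americas", "Asia", "Europe", "Oceania"]).isEmpty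
      · exact List.isEmpty_iff.mp hc
      · rw [if_neg hc] at h; exact absurd h (by simp)
    rw [PySem.Set.issubset_iff]
    intro x hx
    rw [PySem.Set.mem_ofList] at hx ⊢
    rw [List.filter_eq_nil_iff] at hnil
    have hxs := hnil x hx
    simpa using hxs
  · intro h
    have hsub := (PySem.Set.issubset_iff _ _).mp h
    have hnil : List.filter (fun a => !((lst.map contOf).contains a))
        ["Africa", "Americas", "Asia", "Europe", "Oceania"] = [] := by
      rw [List.filter_eq_nil_iff]
      intro a ha
      have := hsub a (by rw [PySem.Set.mem_ofList]; exact ha)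
      rw [PySem.Set.mem_ofList] at this
      simpa using this
    rw [hnil]
    rfl
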